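-- pv_equiv track=rewrite | github.com/papabillys/ProjectEuler | problem04.py | findProducts
-- ===== SOURCE A (Python) =====
-- def findProducts(number):
--     i = 999
--     while i > 100:
--         j = 999
--         exit_flag = False
--         while not exit_flag:
--             if i*j > number:
--                 j = j-1
--                 if j < 100:
--                     exit_flag = True
--             elif i*j == number:
--                 return i
--             else:
--                 exit_flag = True
--         i = i-1
--     return 0
-- ===== SOURCE B (Python) =====
-- def findProducts(number):
--     for i in range(999, 100, -1):
--         if number % i == 0:
--             q = number // i
--             if 100 <= q <= 999:
--                 return i
--     return 0
-- ===== Notes on version B (the rewrite author's own statement) =====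
-- stated objective: faster
-- what changed: Replaced A's nested 900x900 countdown over all (i,j) products by a single loop over i that tests number % i == 0 and that the quotient lies in [100, 999].
import Mathlib
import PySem

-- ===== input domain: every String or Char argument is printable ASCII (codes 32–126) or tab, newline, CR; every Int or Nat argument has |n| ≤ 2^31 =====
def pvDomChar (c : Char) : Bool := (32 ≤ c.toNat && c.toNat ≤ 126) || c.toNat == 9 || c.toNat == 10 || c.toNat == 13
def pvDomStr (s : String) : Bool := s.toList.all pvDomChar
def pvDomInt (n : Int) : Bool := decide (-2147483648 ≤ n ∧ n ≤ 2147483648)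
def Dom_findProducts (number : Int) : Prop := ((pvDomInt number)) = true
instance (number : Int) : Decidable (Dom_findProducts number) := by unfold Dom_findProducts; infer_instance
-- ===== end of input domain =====

-- B replaces A's quadratic 900x900 product scan by a single loop over i testing divisibility
-- and that the quotient lies in [100, 999]; objective: faster (asymptotic).


-- ===== PORT A =====
-- inner 'while not exit_flag' loop of A: j counts down from 999; some i = 'return i', none = exit_flag
def findProductsInner (number i : Int) (j : Nat) : Option Int :=
  if i * (j : Int) > number then
    if (j : Int) - 1 < 100 then none
    else findProductsInner number i (j - 1)
  else if i * (j : Int) = number then some i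
  else none
termination_by j
decreasing_by omega

-- outer 'while i > 100' loop of A
def findProductsOuter (number : Int) (i : Nat) : Int :=
  if (i : Int) > 100 then
    match findProductsInner number (i : Int) 999 with
    | some r => r
    | none => findProductsOuter number (i - 1)
  else 0
termination_by i
decreasing_by omega

def findProducts (number : Int) : Int := findProductsOuter number 999

-- ===== PORT B =====
-- B: for i in range(999, 100, -1): if number % i == 0 and 100 <= number // i <= 999: return i
def findProductsAltLoop (number : Int) (i : Nat) : Int :=
  if 101 ≤ i then
    if PySem.Int.mod number (i : Int) = 0 ∧
       100 ≤ PySem.Int.floordiv number (i : Int) ∧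
       PySem.Int.floordiv number (i : Int) ≤ 999 then (i : Int)
    else findProductsAltLoop number (i - 1)
  else 0
termination_by i
decreasing_by omega

def findProducts_alt (number : Int) : Int := findProductsAltLoop number 999

-- ===== PRECONDITION & SPEC =====
def Spec_findProducts (number : Int) (out : Int) : Prop := out = findProducts_alt number
instance (number : Int) (out : Int) : Decidable (Spec_findProducts number out) := by unfold Spec_findProducts; infer_instance

-- ===== CLAIM (what is proved, stated in full; the proofs are below) =====
def Claim_equal_findProducts : Prop := ∀ (number : Int), Dom_findProducts number → Spec_findProducts number (findProducts number)

-- ===== LEMMAS AND PROOFS =====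

-- A's inner scan of j from 'j' down to 100 finds a product iff i divides number with a cofactor in [100, j]
theorem findProductsInner_eq (number i : Int) (j : Nat) (hi : 0 < i) (hj : 100 ≤ j) :
    findProductsInner number i j =
      if i ∣ number ∧ 100 * i ≤ number ∧ number ≤ i * (j : Int) then some i else none := by
  induction j with
  | zero => omega
  | succ n ih =>
    rw [findProductsInner]
    by_cases hgt : i * ((n + 1 : Nat) : Int) > number
    · simp only [if_pos hgt]
      by_cases hlast : ((n + 1 : Nat) : Int) - 1 < 100
      · -- j = 100: exit with none; the condition cannot hold either
        simp only [if_pos hlast]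
        rw [if_neg]
        rintro ⟨hd, hlo, hhi⟩
        have hj100 : ((n + 1 : Nat) : Int) = 100 := by omega
        rw [hj100] at hgt hhi
        omega
      · simp only [if_neg hlast]
        have hn : 100 ≤ n := by omega
        have hsub : n + 1 - 1 = n := rfl
        rw [hsub, ih hn]
        by_cases hd : i ∣ number
        · obtain ⟨k, hk⟩ := hd
          have hkn : number ≤ i * (n : Int) ↔ number ≤ i * ((n + 1 : Nat) : Int) := by
            constructor
            · intro h; push_cast at *; nlinarith
            · intro _
              -- number = i * k < i * (n+1) so k ≤ n
              have hklt : k < ((n + 1 : Nat) : Int) := by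
                by_contra hc
                push_neg at hc
                have : i * ((n + 1 : Nat) : Int) ≤ i * k := by
                  exact mul_le_mul_of_nonneg_left hc (le_of_lt hi)
                omega
              have : k ≤ (n : Int) := by push_cast at hklt ⊢; omega
              calc number = i * k := hk
                _ ≤ i * (n : Int) := mul_le_mul_of_nonneg_left this (le_of_lt hi)
          rw [hk] at *
          by_cases hrest : 100 * i ≤ i * k ∧ i * k ≤ i * (n : Int)
          · rw [if_pos ⟨⟨k, rfl⟩, hrest.1, hrest.2⟩, if_pos ⟨⟨k, rfl⟩, hrest.1, hkn.mp hrest.2⟩]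
          · rw [if_neg, if_neg]
            · rintro ⟨_, h1, h2⟩; exact hrest ⟨h1, hkn.mpr h2⟩
            · rintro ⟨_, h1, h2⟩; exact hrest ⟨h1, h2⟩
        · rw [if_neg, if_neg]
          · rintro ⟨h, _⟩; exact hd h
          · rintro ⟨h, _⟩; exact hd h
    · simp only [if_neg hgt]
      push Not at hgt
      by_cases heq : i * ((n + 1 : Nat) : Int) = number
      · rw [if_pos heq, if_pos]
        refine ⟨⟨((n + 1 : Nat) : Int), heq.symm⟩, ?_, by omega⟩
        have : (100 : Int) ≤ ((n + 1 : Nat) : Int) := by omega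
        calc (100 : Int) * i = i * 100 := by ring
          _ ≤ i * ((n + 1 : Nat) : Int) := mul_le_mul_of_nonneg_left this (le_of_lt hi)
          _ = number := heq
      · rw [if_neg heq, if_neg]
        rintro ⟨hd, hlo, hhi⟩
        exact heq (by omega)

-- B's per-i test is exactly the condition A's inner scan (from 999) detects
theorem altCond_iff (number : Int) (i : Nat) (hi : 101 ≤ i) :
    (PySem.Int.mod number (i : Int) = 0 ∧
       100 ≤ PySem.Int.floordiv number (i : Int) ∧
       PySem.Int.floordiv number (i : Int) ≤ 999)
      ↔ ((i : Int) ∣ number ∧ 100 * (i : Int) ≤ number ∧ number ≤ (i : Int) * 999) := by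
  have hipos : (0 : Int) < (i : Int) := by omega
  rw [PySem.Int.mod_eq_zero_iff_dvd]
  constructor
  · rintro ⟨hd, hlo, hhi⟩
    obtain ⟨k, hk⟩ := hd
    refine ⟨⟨k, hk⟩, ?_, ?_⟩
    · have := (PySem.Int.le_floordiv_iff_mul_le (a := number) (b := (i : Int)) (q := 100) hipos).mp hlo
      omega
    · have hlt : PySem.Int.floordiv number (i : Int) < 1000 := by omega
      have := (PySem.Int.floordiv_lt_iff_lt_mul (a := number) (b := (i : Int)) (q := 1000) hipos).mp hlt
      -- number = i * k < 1000 * i, so k ≤ 999 and number ≤ i * 999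
      rw [hk] at this ⊢
      have hk999 : k ≤ 999 := by nlinarith
      exact mul_le_mul_of_nonneg_left hk999 (le_of_lt hipos)
  · rintro ⟨hd, hlo, hhi⟩
    refine ⟨hd, ?_, ?_⟩
    · exact (PySem.Int.le_floordiv_iff_mul_le hipos).mpr hlo
    · have : PySem.Int.floordiv number (i : Int) < 1000 :=
        (PySem.Int.floordiv_lt_iff_lt_mul hipos).mpr (by omega)
      omega

theorem outer_eq_altLoop (number : Int) (i : Nat) :
    findProductsOuter number i = findProductsAltLoop number i := by
  induction i with
  | zero => rw [findProductsOuter, findProductsAltLoop]; norm_num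
  | succ n ih =>
    rw [findProductsOuter, findProductsAltLoop]
    by_cases hi : 101 ≤ n + 1
    · have hgt : ((n + 1 : Nat) : Int) > 100 := by omega
      have hipos : (0 : Int) < ((n + 1 : Nat) : Int) := by omega
      rw [if_pos hgt, if_pos hi,
        findProductsInner_eq number ((n + 1 : Nat) : Int) 999 hipos (by omega)]
      have h999 : (((999 : Nat) : Int)) = (999 : Int) := by norm_num
      rw [h999]
      by_cases hc : ((n + 1 : Nat) : Int) ∣ number ∧ 100 * ((n + 1 : Nat) : Int) ≤ number ∧
          number ≤ ((n + 1 : Nat) : Int) * 999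
      · rw [if_pos hc, if_pos ((altCond_iff number (n + 1) hi).mpr hc)]
      · rw [if_neg hc, if_neg (fun h => hc ((altCond_iff number (n + 1) hi).mp h))]
        exact ih
    · rw [if_neg (by omega : ¬ ((n + 1 : Nat) : Int) > 100), if_neg hi]

-- ===== VERDICT (by name: the statement is the Claim_ definition above) =====
theorem findProducts_spec : Claim_equal_findProducts := by
  intro number _
  unfold Spec_findProducts findProducts findProducts_alt
  exact outer_eq_altLoop number 999
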